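-- pv_equiv track=rewrite | github.com/mojoro/advent-of-code-2023 | day-4-puzzle-pt2.py | evaluate_cards
-- ===== SOURCE A (Python) =====
-- def evaluate_cards(winning_numbers, card_numbers):
--   i = 0
--   j = 0
--   x = 0
--   results = []
--   while i < len(winning_numbers):
--     wins = 0
--     winning_row = winning_numbers[i]
--     card_row = card_numbers[i]
--     while j < len(winning_row):
--       if x < len(card_row) and winning_row[j] == card_row[x]:
--         wins += 1
--         x += 1
--       elif x < len(card_row) and winning_row[j] != card_row[x]:
--         x += 1
--       elif x >= len(card_row):
--         x = 0
--         j += 1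
--     results.append(wins)
--     j = 0
--     i += 1
--   return results
-- ===== SOURCE B (Python) =====
-- def evaluate_cards(winning_numbers, card_numbers):
--     results = []
--     for winning_row, card_row in zip(winning_numbers, card_numbers):
--         ws = sorted(winning_row)
--         cs = sorted(card_row)
--         wins = 0
--         i = j = 0
--         while i < len(ws) and j < len(cs):
--             if ws[i] < cs[j]:
--                 i += 1
--             elif cs[j] < ws[i]:
--                 j += 1
--             else:
--                 v = ws[i]
--                 ri = i
--                 while ri < len(ws) and ws[ri] == v:
--                     ri += 1
--                 rj = j
--                 while rj < len(cs) and cs[rj] == v: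
--                     rj += 1
--                 wins += (ri - i) * (rj - j)
--                 i, j = ri, rj
--         results.append(wins)
--     return results
-- ===== Notes on version B (the rewrite author's own statement) =====
-- stated objective: faster
-- what changed: Replaces A's inner full rescan of the card row for every winning number by sorting both rows once and counting matches in a single two-pointer merge that multiplies equal-run lengths.
import Mathlib
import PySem

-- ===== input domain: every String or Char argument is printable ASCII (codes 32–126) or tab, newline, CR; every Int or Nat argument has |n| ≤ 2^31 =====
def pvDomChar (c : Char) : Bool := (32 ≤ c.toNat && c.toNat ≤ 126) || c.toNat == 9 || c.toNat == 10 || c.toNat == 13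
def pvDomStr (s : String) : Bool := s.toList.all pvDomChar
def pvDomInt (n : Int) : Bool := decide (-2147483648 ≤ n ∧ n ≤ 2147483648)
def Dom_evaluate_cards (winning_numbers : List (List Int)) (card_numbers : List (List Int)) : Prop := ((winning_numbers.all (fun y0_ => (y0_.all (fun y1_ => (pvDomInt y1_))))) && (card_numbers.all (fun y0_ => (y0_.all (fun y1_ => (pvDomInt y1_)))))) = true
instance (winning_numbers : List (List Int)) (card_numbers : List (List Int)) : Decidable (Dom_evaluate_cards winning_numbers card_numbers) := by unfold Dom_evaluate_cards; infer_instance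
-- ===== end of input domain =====

-- B replaces A's per-winning-number rescan of the card row by sorting both rows (sorted(), no mutation)
-- and counting the matches in one two-pointer merge with run-length products.

-- ===== PORT A =====
-- inner while loop of A: j scans winning_row, x scans card_row, exactly A's three branches
def innerA (wr cr : List Int) (j x : Nat) (wins : Int) : Int :=
  if hj : j < wr.length then
    if hx : x < cr.length then
      if wr[j] = cr[x] then innerA wr cr j (x + 1) (wins + 1)
      else innerA wr cr j (x + 1) wins
    else innerA wr cr (j + 1) 0 wins
  else wins
termination_by (wr.length - j, cr.length - x)
decreasing_by
  · apply Prod.Lex.right; omega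
  · apply Prod.Lex.right; omega
  · apply Prod.Lex.left; omega

-- outer while loop of A, walking i over winning_numbers; `cn.getD i []` is `card_numbers[i]`, in range whenever Pre_ holds
def outerA (cn : List (List Int)) : List (List Int) → Nat → List Int → List Int
  | [], _, acc => acc
  | wr :: rest, i, acc => outerA cn rest (i + 1) (acc ++ [innerA wr (cn.getD i []) 0 0 0])

def evaluate_cards (winning_numbers : List (List Int)) (card_numbers : List (List Int)) : List Int :=
  outerA card_numbers winning_numbers 0 []

-- ===== PORT B =====
-- `while r < len(xs) and xs[r] == v: r += 1` — end index of the equal run starting at k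
def runEnd (xs : List Int) (v : Int) (k : Nat) : Nat :=
  if h : k < xs.length then
    if xs[k] = v then runEnd xs v (k + 1) else k
  else k
termination_by xs.length - k

-- the two-pointer merge loop of B over the two sorted rows; fuel is a pure totality guard
-- (each iteration advances a pointer, so len ws + len cs iterations always suffice)
def mergeB (ws cs : List Int) (i j : Nat) (wins : Int) : Nat → Int
  | 0 => wins
  | fuel + 1 =>
    if h : i < ws.length ∧ j < cs.length then
      if ws[i]'h.1 < cs[j]'h.2 then mergeB ws cs (i + 1) j wins fuel
      else if cs[j]'h.2 < ws[i]'h.1 then mergeB ws cs i (j + 1) wins fuel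
      else
        let ri := runEnd ws (ws[i]'h.1) i
        let rj := runEnd cs (cs[j]'h.2) j
        mergeB ws cs ri rj (wins + ((ri - i : Nat) : Int) * ((rj - j : Nat) : Int)) fuel
    else wins

def evaluate_cards_alt (winning_numbers : List (List Int)) (card_numbers : List (List Int)) : List Int :=
  (winning_numbers.zip card_numbers).map
    (fun p => mergeB (PySem.List.sorted p.1 (fun x => x) false)
                     (PySem.List.sorted p.2 (fun x => x) false) 0 0 0
                     (p.1.length + p.2.length))

-- ===== PRECONDITION & SPEC =====
-- Pre_ excludes exactly the inputs where A raises IndexError: card_numbers shorter than winning_numbers.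
def Pre_evaluate_cards (winning_numbers : List (List Int)) (card_numbers : List (List Int)) : Prop :=
  winning_numbers.length ≤ card_numbers.length
instance (winning_numbers : List (List Int)) (card_numbers : List (List Int)) : Decidable (Pre_evaluate_cards winning_numbers card_numbers) := by unfold Pre_evaluate_cards; infer_instance

def pvWitness_evaluate_cards : List (List Int) × List (List Int) := ([[1, 2]], [[2, 3]])

def Spec_evaluate_cards (winning_numbers : List (List Int)) (card_numbers : List (List Int)) (out : List Int) : Prop := out = evaluate_cards_alt winning_numbers card_numbers
instance (winning_numbers : List (List Int)) (card_numbers : List (List Int)) (out : List Int) : Decidable (Spec_evaluate_cards winning_numbers card_numbers out) := by unfold Spec_evaluate_cards; infer_instance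

-- ===== CLAIM (what is proved, stated in full; the proofs are below) =====
def Claim_equal_evaluate_cards : Prop := ∀ (winning_numbers : List (List Int)) (card_numbers : List (List Int)), Dom_evaluate_cards winning_numbers card_numbers → Pre_evaluate_cards winning_numbers card_numbers → Spec_evaluate_cards winning_numbers card_numbers (evaluate_cards winning_numbers card_numbers)

-- ===== LEMMAS AND PROOFS =====

-- the per-row value both programs compute: sum over w in ws of (occurrences of w in cs)
def sumC (ws cs : List Int) : Int := (ws.map (fun w => ((cs.count w : Nat) : Int))).sum

theorem sumC_nil_left (cs : List Int) : sumC [] cs = 0 := rfl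

theorem sumC_nil (ws : List Int) : sumC ws [] = 0 := by
  simp [sumC]

theorem sumC_cons (w : Int) (ws cs : List Int) :
    sumC (w :: ws) cs = ((cs.count w : Nat) : Int) + sumC ws cs := by
  simp [sumC]

theorem sumC_append (a b cs : List Int) : sumC (a ++ b) cs = sumC a cs + sumC b cs := by
  simp [sumC]

theorem sumC_congr_right (ws l1 l2 : List Int)
    (h : ∀ w ∈ ws, l1.count w = l2.count w) : sumC ws l1 = sumC ws l2 := by
  unfold sumC
  congr 1
  exact List.map_congr_left (fun w hw => by rw [h w hw])

theorem sumC_replicate (n : Nat) (v : Int) (cs : List Int) :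
    sumC (List.replicate n v) cs = (n : Int) * ((cs.count v : Nat) : Int) := by
  simp [sumC, List.map_replicate, List.sum_replicate]

-- ---------- A side ----------

-- partial per-row sum still to be accumulated when the inner loop is at (j, x)
def tailSum (wr cr : List Int) (j x : Nat) : Int :=
  if hj : j < wr.length then ((cr.drop x).count wr[j] : Nat) + sumC (wr.drop (j + 1)) cr
  else 0

theorem tailSum_zero (wr cr : List Int) (j : Nat) : tailSum wr cr j 0 = sumC (wr.drop j) cr := by
  unfold tailSum
  by_cases hj : j < wr.length
  · rw [dif_pos hj, List.drop_eq_getElem_cons hj, sumC_cons]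
    simp
  · rw [dif_neg hj, List.drop_eq_nil_of_le (by omega)]
    rfl

theorem innerA_spec (wr cr : List Int) (j x : Nat) (wins : Int) (hx : x ≤ cr.length) :
    innerA wr cr j x wins = wins + tailSum wr cr j x := by
  fun_induction innerA wr cr j x wins with
  | case1 j x wins hj hxl he ih =>
    rw [ih (by omega)]
    have hd : cr.drop x = cr[x] :: cr.drop (x + 1) := List.drop_eq_getElem_cons hxl
    unfold tailSum
    rw [dif_pos hj, dif_pos hj, hd, List.count_cons]
    simp only [he, beq_self_eq_true, if_true]
    push_cast; ring
  | case2 j x wins hj hxl he ih =>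
    rw [ih (by omega)]
    have hd : cr.drop x = cr[x] :: cr.drop (x + 1) := List.drop_eq_getElem_cons hxl
    unfold tailSum
    have hne : ¬ cr[x] = wr[j] := fun hh => he hh.symm
    rw [dif_pos hj, dif_pos hj, hd, List.count_cons]
    simp [hne]
  | case3 j x wins hj hxl ih =>
    rw [ih (by omega), tailSum_zero]
    have hx0 : cr.drop x = [] := List.drop_eq_nil_of_le (by omega)
    unfold tailSum
    rw [dif_pos hj, hx0]
    simp
  | case4 j x wins hj =>
    unfold tailSum
    rw [dif_neg hj]
    ring

theorem innerA_row (wr cr : List Int) : innerA wr cr 0 0 0 = sumC wr cr := by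
  rw [innerA_spec wr cr 0 0 0 (by omega), tailSum_zero]
  simp

theorem outerA_spec (cn : List (List Int)) (rest : List (List Int)) (i : Nat) (acc : List Int)
    (hlen : i + rest.length ≤ cn.length) :
    outerA cn rest i acc = acc ++ (rest.zip (cn.drop i)).map (fun p => sumC p.1 p.2) := by
  induction rest generalizing i acc with
  | nil => simp [outerA]
  | cons wr rest ih =>
    have hic : i < cn.length := by simp at hlen; omega
    have hcd : cn.drop i = cn[i] :: cn.drop (i + 1) := List.drop_eq_getElem_cons hic
    rw [outerA, ih (i + 1) _ (by simp at hlen ⊢; omega), hcd, List.zip_cons_cons, List.map_cons,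
      List.getD_eq_getElem cn [] hic, innerA_row, List.append_cons]
    simp

theorem evaluate_cards_eq (wn cn : List (List Int)) (h : wn.length ≤ cn.length) :
    evaluate_cards wn cn = (wn.zip cn).map (fun p => sumC p.1 p.2) := by
  unfold evaluate_cards
  rw [outerA_spec cn wn 0 [] (by omega)]
  simp

-- ---------- B side ----------

theorem runEnd_ge (xs : List Int) (v : Int) (k : Nat) : k ≤ runEnd xs v k := by
  fun_induction runEnd xs v k <;> omega

theorem runEnd_gt (xs : List Int) (v : Int) (k : Nat) (h : k < xs.length) (he : xs[k] = v) :
    k < runEnd xs v k := by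
  rw [runEnd]; simp only [h, dite_true, he, if_true]
  have := runEnd_ge xs v (k + 1); omega

theorem mem_drop_of_le (xs : List Int) (a b : Nat) (h : a ≤ b) :
    ∀ w ∈ xs.drop b, w ∈ xs.drop a := by
  intro w hw
  have hd : xs.drop b = (xs.drop a).drop (b - a) := by
    rw [List.drop_drop]; congr 1; omega
  rw [hd] at hw
  exact List.mem_of_mem_drop hw

theorem sorted_drop_le (xs : List Int) (h : xs.Pairwise (· ≤ ·)) (m : Nat) (hm : m < xs.length) :
    ∀ w ∈ xs.drop m, xs[m] ≤ w := by
  have hd : xs.drop m = xs[m] :: xs.drop (m + 1) := List.drop_eq_getElem_cons hm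
  have hp : (xs.drop m).Pairwise (· ≤ ·) := h.sublist (List.drop_sublist m xs)
  rw [hd] at hp
  intro w hw
  rw [hd] at hw
  rcases List.mem_cons.mp hw with h1 | h2
  · omega
  · exact (List.pairwise_cons.mp hp).1 w h2

theorem runEnd_drop (xs : List Int) (v : Int) (k : Nat) :
    xs.drop k = List.replicate (runEnd xs v k - k) v ++ xs.drop (runEnd xs v k) := by
  fun_induction runEnd xs v k with
  | case1 k h he ih =>
    have hge := runEnd_ge xs v (k + 1)
    have hd : xs.drop k = xs[k] :: xs.drop (k + 1) := List.drop_eq_getElem_cons h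
    rw [hd, ih, he]
    have hrep : runEnd xs v (k + 1) - k = (runEnd xs v (k + 1) - (k + 1)) + 1 := by omega
    rw [hrep, List.replicate_succ, List.cons_append]
  | case2 k h he => simp
  | case3 k h => simp

theorem runEnd_getElem_ne (xs : List Int) (v : Int) (k : Nat)
    (h : runEnd xs v k < xs.length) : xs[runEnd xs v k] ≠ v := by
  fun_induction runEnd xs v k with
  | case1 k hk he ih => exact ih h
  | case2 k hk he => exact he
  | case3 k hk => omega

theorem take_runEnd (cs : List Int) (v : Int) (j : Nat) :
    cs.take (runEnd cs v j) = cs.take j ++ List.replicate (runEnd cs v j - j) v := by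
  have h1 := runEnd_ge cs v j
  have h2 := runEnd_drop cs v j
  have h3 : runEnd cs v j = j + (runEnd cs v j - j) := by omega
  calc cs.take (runEnd cs v j) = cs.take (j + (runEnd cs v j - j)) := by rw [← h3]
    _ = cs.take j ++ (cs.drop j).take (runEnd cs v j - j) := by rw [List.take_add]
    _ = cs.take j ++ List.replicate (runEnd cs v j - j) v := by
        rw [h2]; congr 1; exact List.take_left' (by simp)

-- every element from the end of the v-run onward is > v (sorted list, run starting at k with xs[k] = v)
theorem gt_of_mem_drop_runEnd (xs : List Int) (v : Int) (k : Nat)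
    (hs : xs.Pairwise (· ≤ ·)) (hk : k < xs.length) (he : xs[k] = v) :
    ∀ w ∈ xs.drop (runEnd xs v k), v < w := by
  intro w hw
  have hne : xs.drop (runEnd xs v k) ≠ [] := List.ne_nil_of_mem hw
  have hlt : runEnd xs v k < xs.length := by
    by_contra hge
    rw [List.drop_eq_nil_of_le (by omega)] at hne
    exact hne rfl
  have h1 : xs[runEnd xs v k] ≤ w := sorted_drop_le xs hs _ hlt w hw
  have h2 : xs[runEnd xs v k] ≠ v := runEnd_getElem_ne xs v k hlt
  have hge := runEnd_ge xs v k
  have hmem : xs[runEnd xs v k] ∈ xs.drop k := by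
    have hd : xs.drop (runEnd xs v k) = xs[runEnd xs v k] :: xs.drop (runEnd xs v k + 1) :=
      List.drop_eq_getElem_cons hlt
    refine mem_drop_of_le xs k (runEnd xs v k) hge _ ?_
    rw [hd]; exact List.mem_cons_self
  have h3 : v ≤ xs[runEnd xs v k] := by
    have := sorted_drop_le xs hs k hk _ hmem
    omega
  omega

theorem count_eq_zero_of_gt (v : Int) (l : List Int) (h : ∀ w ∈ l, v < w) :
    l.count v = 0 := by
  rw [List.count_eq_zero]
  intro hm
  exact absurd (h v hm) (lt_irrefl v)

theorem mergeB_spec (ws cs : List Int) (i j : Nat) (wins : Int) (fuel : Nat)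
    (hw : ws.Pairwise (· ≤ ·)) (hc : cs.Pairwise (· ≤ ·)) :
    (ws.length - i) + (cs.length - j) ≤ fuel →
    (∀ c ∈ cs.take j, ∀ w ∈ ws.drop i, c < w) →
    mergeB ws cs i j wins fuel = wins + sumC (ws.drop i) (cs.drop j) := by
  fun_induction mergeB ws cs i j wins fuel with
  | case1 i j wins =>
    intro hfuel hsep
    by_cases h1 : ws.length ≤ i
    · rw [List.drop_eq_nil_of_le (as := ws) h1, sumC_nil_left]; ring
    · have h2 : cs.length ≤ j := by omega
      rw [List.drop_eq_nil_of_le (as := cs) h2, sumC_nil]; ring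
  | case2 i j wins fuel h hlt ih =>
    intro hfuel hsep
    rw [ih (by omega) (fun c hc' w hw' => hsep c hc' w (mem_drop_of_le ws i (i + 1) (by omega) w hw'))]
    have hd : ws.drop i = ws[i] :: ws.drop (i + 1) := List.drop_eq_getElem_cons h.1
    rw [hd, sumC_cons]
    have hz : (cs.drop j).count (ws[i]'h.1) = 0 := by
      rw [List.count_eq_zero]
      intro hm
      have := sorted_drop_le cs hc j h.2 _ hm
      omega
    rw [hz]
    simp
  | case3 i j wins fuel h hlt1 hlt2 ih =>
    intro hfuel hsep
    have hdc : cs.drop j = cs[j] :: cs.drop (j + 1) := List.drop_eq_getElem_cons h.2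
    have hsep' : ∀ c ∈ cs.take (j + 1), ∀ w ∈ ws.drop i, c < w := by
      intro c hcmem w hwmem
      rw [List.take_add_one, List.getElem?_eq_getElem h.2] at hcmem
      rcases List.mem_append.mp hcmem with h1 | h2
      · exact hsep c h1 w hwmem
      · have hcv : c = cs[j]'h.2 := by simpa using h2
        have hle : ws[i]'h.1 ≤ w := sorted_drop_le ws hw i h.1 w hwmem
        omega
    rw [ih (by omega) hsep']
    congr 1
    apply sumC_congr_right
    intro w hwmem
    have hle : ws[i]'h.1 ≤ w := sorted_drop_le ws hw i h.1 w hwmem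
    rw [hdc, List.count_cons]
    have hne2 : ¬ cs[j]'h.2 = w := by omega
    simp [hne2]
  | case4 i j wins fuel h hlt1 hlt2 r1 r2 ih =>
    intro hfuel hsep
    have hr1 : r1 = runEnd ws (ws[i]'h.1) i := rfl
    have hr2 : r2 = runEnd cs (cs[j]'h.2) j := rfl
    rw [hr1, hr2] at ih ⊢
    have hv : ws[i]'h.1 = cs[j]'h.2 := by omega
    have hvc : cs[j]'h.2 = ws[i]'h.1 := hv.symm
    have hgew := runEnd_ge ws (ws[i]'h.1) i
    have hgec := runEnd_ge cs (cs[j]'h.2) j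
    have hgtw' := runEnd_gt ws (ws[i]'h.1) i h.1 rfl
    have hgtc' := runEnd_gt cs (cs[j]'h.2) j h.2 rfl
    have hdw : ws.drop i =
        List.replicate (runEnd ws (ws[i]'h.1) i - i) (ws[i]'h.1) ++
          ws.drop (runEnd ws (ws[i]'h.1) i) := runEnd_drop ws _ i
    have hdc : cs.drop j =
        List.replicate (runEnd cs (cs[j]'h.2) j - j) (cs[j]'h.2) ++
          cs.drop (runEnd cs (cs[j]'h.2) j) := runEnd_drop cs _ j
    have hgtw : ∀ w ∈ ws.drop (runEnd ws (ws[i]'h.1) i), ws[i]'h.1 < w :=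
      gt_of_mem_drop_runEnd ws _ i hw h.1 rfl
    have hgtc : ∀ w ∈ cs.drop (runEnd cs (cs[j]'h.2) j), ws[i]'h.1 < w := by
      intro w hwmem
      have := gt_of_mem_drop_runEnd cs _ j hc h.2 rfl w hwmem
      omega
    have hsep' : ∀ c ∈ cs.take (runEnd cs (cs[j]'h.2) j),
        ∀ w ∈ ws.drop (runEnd ws (ws[i]'h.1) i), c < w := by
      intro c hcmem w hwmem
      rw [take_runEnd] at hcmem
      rcases List.mem_append.mp hcmem with h1 | h2
      · exact hsep c h1 w (mem_drop_of_le ws i _ hgew w hwmem)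
      · have hcv : c = cs[j]'h.2 := List.eq_of_mem_replicate h2
        rw [hcv, hvc]
        exact hgtw w hwmem
    rw [ih (by omega) hsep']
    have hcount : (cs.drop j).count (ws[i]'h.1) =
        (runEnd cs (cs[j]'h.2) j - j) + (cs.drop (runEnd cs (cs[j]'h.2) j)).count (ws[i]'h.1) := by
      rw [hdc, List.count_append, hvc, List.count_replicate]
      simp
    have hcz : (cs.drop (runEnd cs (cs[j]'h.2) j)).count (ws[i]'h.1) = 0 :=
      count_eq_zero_of_gt _ _ hgtc
    have htail : sumC (ws.drop (runEnd ws (ws[i]'h.1) i)) (cs.drop j) =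
        sumC (ws.drop (runEnd ws (ws[i]'h.1) i)) (cs.drop (runEnd cs (cs[j]'h.2) j)) := by
      apply sumC_congr_right
      intro w hwmem
      have hwgt := hgtw w hwmem
      rw [hdc, List.count_append, hvc, List.count_replicate]
      simp
      omega
    rw [hdw, sumC_append, sumC_replicate, hcount, hcz, htail]
    push_cast
    ring
  | case5 i j wins fuel h =>
    intro hfuel hsep
    by_cases h1 : ws.length ≤ i
    · rw [List.drop_eq_nil_of_le (as := ws) h1, sumC_nil_left]; ring
    · have h2 : cs.length ≤ j := by omega
      rw [List.drop_eq_nil_of_le (as := cs) h2, sumC_nil]; ring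

theorem sumC_sorted (wr cr : List Int) :
    sumC (PySem.List.sorted wr (fun x => x) false) (PySem.List.sorted cr (fun x => x) false)
      = sumC wr cr := by
  have hp1 : (PySem.List.sorted wr (fun x => x) false).Perm wr := PySem.List.sorted_perm wr (fun x => x) false
  have hp2 : (PySem.List.sorted cr (fun x => x) false).Perm cr := PySem.List.sorted_perm cr (fun x => x) false
  unfold sumC
  rw [List.Perm.sum_eq (hp1.map _)]
  apply congrArg
  apply List.map_congr_left
  intro w _
  rw [hp2.count_eq]

theorem evaluate_cards_alt_eq (wn cn : List (List Int)) :
    evaluate_cards_alt wn cn = (wn.zip cn).map (fun p => sumC p.1 p.2) := by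
  unfold evaluate_cards_alt
  apply List.map_congr_left
  intro p _
  have hw : (PySem.List.sorted p.1 (fun x => x) false).Pairwise (· ≤ ·) := by
    have := PySem.List.sorted_pairwise (xs := p.1) (key := fun x => x)
    simpa using this
  have hc : (PySem.List.sorted p.2 (fun x => x) false).Pairwise (· ≤ ·) := by
    have := PySem.List.sorted_pairwise (xs := p.2) (key := fun x => x)
    simpa using this
  rw [mergeB_spec _ _ 0 0 0 _ hw hc (by simp) (by intro c hcm; simp at hcm)]
  simp [sumC_sorted]

-- ===== VERDICT (by name: the statement is the Claim_ definition above) =====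
theorem evaluate_cards_spec : Claim_equal_evaluate_cards := by
  intro wn cn _ hpre
  unfold Spec_evaluate_cards
  rw [evaluate_cards_eq wn cn hpre, evaluate_cards_alt_eq]
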